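-- pv_equiv track=rewrite | github.com/abdnahal/python_module_03 | ex3/ft_achievement_tracker.py | rare_achievements
-- ===== SOURCE A (Python) =====
-- def rare_achievements(players: dict) -> set:
--     all_achievements = set()
--
--     for achievements in players.values():
--         all_achievements = all_achievements.union(achievements)
--
--     rare = set()
--
--     for achievement in all_achievements:
--         count = 0
--         for achievements in players.values():
--             if achievement in achievements:
--                 count += 1
--
--         if count == 1:
--             rare.add(achievement)
--
--     return rare
-- ===== SOURCE B (Python) =====
-- def rare_achievements(players: dict) -> set:
--     counts = {}
--     for achievements in players.values():
--         for a in set(achievements):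
--             counts[a] = counts.get(a, 0) + 1
--     return {a for a, c in counts.items() if c == 1}
-- ===== Notes on version B (the rewrite author's own statement) =====
-- stated objective: faster
-- what changed: B replaces A's per-achievement rescan of all players with a single accumulating pass that builds an occurrence-count dict, then selects the keys with count 1.
import Mathlib
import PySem

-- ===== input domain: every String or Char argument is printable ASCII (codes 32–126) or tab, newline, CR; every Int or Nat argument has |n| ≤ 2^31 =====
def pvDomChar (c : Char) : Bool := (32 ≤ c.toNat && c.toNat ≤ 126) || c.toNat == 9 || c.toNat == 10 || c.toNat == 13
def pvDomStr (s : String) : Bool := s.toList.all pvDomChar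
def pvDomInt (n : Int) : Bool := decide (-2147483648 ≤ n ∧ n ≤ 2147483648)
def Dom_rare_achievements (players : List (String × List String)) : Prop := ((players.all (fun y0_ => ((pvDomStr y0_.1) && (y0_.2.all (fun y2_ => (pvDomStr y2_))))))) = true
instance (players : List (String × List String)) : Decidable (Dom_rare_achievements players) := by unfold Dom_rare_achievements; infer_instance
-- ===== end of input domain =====

-- A builds the union of all achievements, then rescans every player's list per achievement;
-- B (faster) makes one accumulating pass building an occurrence-count dict and selects count-1 keys.
-- Both return a set; the proved equality is of the canonical (first-occurrence-ordered) representations.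

-- ===== PORT A =====
def rare_achievements (players : List (String × List String)) : List String :=
  let all_achievements : PySem.Set String :=
    players.foldl (fun acc p => PySem.Set.union acc p.2) PySem.Set.empty
  all_achievements.foldl (fun rare a =>
    let count : Int := players.foldl (fun c p => if p.2.contains a then c + 1 else c) 0
    if count = 1 then PySem.Set.add rare a else rare) PySem.Set.empty

-- ===== PORT B =====
def rare_achievements_alt (players : List (String × List String)) : List String :=
  let counts : PySem.Dict String Int :=
    players.foldl (fun d p =>
      (PySem.Set.ofList p.2).foldl (fun d a => d.insert a (d.getD a 0 + 1)) d)
      PySem.Dict.empty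
  PySem.Set.ofList ((counts.items.filter (fun kv => kv.2 == 1)).map (·.1))

-- ===== PRECONDITION & SPEC =====
def Spec_rare_achievements (players : List (String × List String)) (out : List String) : Prop := out = rare_achievements_alt players
instance (players : List (String × List String)) (out : List String) : Decidable (Spec_rare_achievements players out) := by unfold Spec_rare_achievements; infer_instance

-- ===== CLAIM (what is proved, stated in full; the proofs are below) =====
def Claim_equal_rare_achievements : Prop := ∀ (players : List (String × List String)), Dom_rare_achievements players → Spec_rare_achievements players (rare_achievements players)

-- ===== LEMMAS AND PROOFS =====

-- the per-player-deduplicated stream of achievements, in pass order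
def pvStream (players : List (String × List String)) : List String :=
  players.flatMap (fun p => PySem.Set.ofList p.2)

-- A's inner counting loop is countP
theorem pv_foldl_count_int {α : Type} (f : α → Bool) :
    ∀ (l : List α) (c : Int), l.foldl (fun c p => if f p then c + 1 else c) c = c + l.countP f := by
  intro l
  induction l with
  | nil => simp
  | cons x t ih =>
    intro c
    by_cases h : f x <;> simp [h, ih]; ring

-- multiplicity in the dedup'd stream = number of players owning the achievement
theorem pv_count_stream (players : List (String × List String)) (a : String) :
    (pvStream players).count a = players.countP (fun p => p.2.contains a) := by
  induction players with
  | nil => simp [pvStream]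
  | cons p t ih =>
    simp only [pvStream, List.flatMap_cons, List.count_append, List.countP_cons] at ih ⊢
    rw [ih]
    by_cases h : a ∈ p.2
    · rw [List.count_eq_one_of_mem (PySem.Set.nodup_ofList p.2)
          (by simpa [PySem.Set.mem_ofList] using h),
        show p.2.contains a = true by simpa using h]
      simp
      omega
    · rw [List.count_eq_zero_of_not_mem (by simpa [PySem.Set.mem_ofList] using h),
        show p.2.contains a = false by simpa using h]
      simp

-- updating with a deduplicated iterable is the same as updating with the raw one
theorem pv_update_ofList {α : Type} [BEq α] [LawfulBEq α] (s : PySem.Set α) (ys : List α) :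
    PySem.Set.update s (PySem.Set.ofList ys) = PySem.Set.update s ys := by
  rw [PySem.Set.update_eq_append_filter, PySem.Set.update_eq_append_filter,
      PySem.Set.ofList_ofList]

-- A's union loop builds exactly set(pvStream)
theorem pv_all_eq (players : List (String × List String)) :
    players.foldl (fun acc p => PySem.Set.union acc p.2) PySem.Set.empty
      = PySem.Set.ofList (pvStream players) := by
  have hfun : (fun (acc : PySem.Set String) (x : String × List String) =>
      List.foldl PySem.Set.add acc (PySem.Set.ofList x.2))
      = fun acc p => PySem.Set.union acc p.2 := by
    funext acc p
    show PySem.Set.update acc (PySem.Set.ofList p.2) = _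
    rw [pv_update_ofList]
    rfl
  unfold pvStream
  rw [PySem.Set.ofList_eq_foldl, List.foldl_flatMap, hfun]
  rfl

-- the filtering fold over a nodup list with fresh elements appends the filtered elements
theorem pv_foldl_add_if {α : Type} [BEq α] [LawfulBEq α] (P : α → Prop) [DecidablePred P] :
    ∀ (l : List α) (s : PySem.Set α), l.Nodup → (∀ a ∈ l, a ∉ s) →
      l.foldl (fun r a => if P a then PySem.Set.add r a else r) s
        = s ++ l.filter (fun a => decide (P a)) := by
  intro l
  induction l with
  | nil => simp
  | cons x t ih =>
    intro s hnd hfresh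
    simp only [List.foldl_cons, List.filter_cons]
    by_cases hP : P x
    · rw [if_pos hP, PySem.Set.add_of_not_mem (hfresh x (by simp)),
          ih (s ++ [x]) hnd.of_cons]
      · simp [hP]
      · intro a ha
        simp only [List.mem_append, List.mem_singleton]
        push Not
        exact ⟨hfresh a (by simp [ha]), fun h => (List.nodup_cons.1 hnd).1 (h ▸ ha)⟩
    · rw [if_neg hP, ih s hnd.of_cons (fun a ha => hfresh a (by simp [ha]))]
      simp [hP]

-- B's dict-building pass is Counter(pvStream)
theorem pv_counts_eq (players : List (String × List String)) :
    players.foldl (fun d p =>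
        (PySem.Set.ofList p.2).foldl (fun d a => d.insert a (d.getD a 0 + 1)) d)
      PySem.Dict.empty = PySem.Dict.counter (pvStream players) := by
  rw [← PySem.Dict.foldl_insert_getD_add_one_eq_counter, pvStream, List.foldl_flatMap]

-- both sides reduce to the same filter over set(pvStream)
theorem pv_common (players : List (String × List String)) :
    rare_achievements players
      = (PySem.Set.ofList (pvStream players)).filter
          (fun a => ((pvStream players).count a : Int) == 1)
    ∧ rare_achievements_alt players
      = (PySem.Set.ofList (pvStream players)).filter
          (fun a => ((pvStream players).count a : Int) == 1) := by
  constructor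
  · show (players.foldl (fun acc p => PySem.Set.union acc p.2) PySem.Set.empty).foldl _ _ = _
    rw [pv_all_eq]
    rw [pv_foldl_add_if
        (fun a => (players.foldl (fun c p => if p.2.contains a then c + 1 else c) (0:Int)) = 1)
        (PySem.Set.ofList (pvStream players)) PySem.Set.empty (PySem.Set.nodup_ofList _) (by simp)]
    rw [show (PySem.Set.empty : PySem.Set String) = ([] : List String) from rfl,
        List.nil_append]
    apply List.filter_congr
    intro a _
    rw [pv_foldl_count_int, pv_count_stream]
    rw [Bool.eq_iff_iff]
    simp only [zero_add, decide_eq_true_eq, beq_iff_eq]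
  · show PySem.Set.ofList (((players.foldl _ PySem.Dict.empty).items.filter _).map _) = _
    rw [pv_counts_eq, PySem.Dict.items_counter, List.filter_map, List.map_map]
    have hid : ((fun (x : String × Int) => x.1) ∘
        fun k => (k, ((pvStream players).count k : Int))) = id := rfl
    rw [hid, List.map_id]
    exact PySem.Set.ofList_eq_self_of_nodup _ ((PySem.Set.nodup_ofList _).filter _)

-- ===== VERDICT (by name: the statement is the Claim_ definition above) =====
theorem rare_achievements_spec : Claim_equal_rare_achievements := by
  intro players _
  show rare_achievements players = rare_achievements_alt players
  rw [(pv_common players).1, (pv_common players).2]
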